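-- pv_equiv track=rewrite | github.com/StarsExpress/LeetCode-Repository | sorting/divisible_deletions/divisible_deletions.py | count_min_deletions
-- ===== SOURCE A (Python) =====
-- from math import gcd
--
-- def count_min_deletions(nums: list[int], divided_nums: list[int]) -> int:  # LeetCode Q.2344.
--     min_gcd = divided_nums[0]  # Base case.
--     for idx in range(len(divided_nums) - 1):
--         greatest_common_divisor = gcd(divided_nums[idx], divided_nums[idx + 1])
--         min_gcd = gcd(min_gcd, greatest_common_divisor)
--         if min_gcd == 1:  # Coprimes exist.
--             break
--
--     nums.sort()
--     deletions, idx = 0, 0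
--     while idx < len(nums):
--         if min_gcd % nums[idx] == 0:
--             return deletions
--         idx += 1
--         deletions += 1
--
--     return -1
-- ===== SOURCE B (Python) =====
-- from math import gcd
--
-- def count_min_deletions(nums, divided_nums):
--     g = gcd(*divided_nums)
--     candidates = [x for x in nums if x != 0 and g % x == 0]
--     if not candidates:
--         return -1
--     smallest = min(candidates)
--     return sum(1 for x in nums if x < smallest)
-- ===== Notes on version B (the rewrite author's own statement) =====
-- stated objective: faster
-- what changed: B replaces A's sort-then-scan (sort nums, walk it until the first element dividing the gcd) by a single linear pass: fold the gcd of divided_nums, pick the smallest element of nums that divides it, and count the elements smaller than it.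
import Mathlib
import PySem

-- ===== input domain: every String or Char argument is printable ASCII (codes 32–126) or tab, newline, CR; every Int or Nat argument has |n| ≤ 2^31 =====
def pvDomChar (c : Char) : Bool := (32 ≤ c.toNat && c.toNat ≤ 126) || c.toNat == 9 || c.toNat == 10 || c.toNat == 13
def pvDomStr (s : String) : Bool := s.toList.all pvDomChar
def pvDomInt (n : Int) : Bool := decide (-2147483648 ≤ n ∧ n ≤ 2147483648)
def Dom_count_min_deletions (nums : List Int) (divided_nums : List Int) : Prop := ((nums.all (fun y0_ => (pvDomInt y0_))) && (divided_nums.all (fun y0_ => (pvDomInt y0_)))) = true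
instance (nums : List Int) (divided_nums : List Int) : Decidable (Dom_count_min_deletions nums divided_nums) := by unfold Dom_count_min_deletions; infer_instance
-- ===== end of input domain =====

-- B replaces A's sort-then-scan (O(n log n)) by a single filter/min/count pass (O(n));
-- equivalence is about the RETURN value only: A sorts `nums` in place, B leaves it unchanged.

-- ===== PORT A =====
-- the `for idx in range(len(divided_nums)-1)` gcd loop with its `break` (returns 1 there)
def aGcdLoop : List Int → Int → Int
  | x :: y :: rest, m =>
      if ((Int.gcd m ((Int.gcd x y : Nat) : Int) : Nat) : Int) = 1 then 1
      else aGcdLoop (y :: rest) ((Int.gcd m ((Int.gcd x y : Nat) : Int) : Nat) : Int)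
  | _, m => m

-- the `while idx < len(nums)` scan over the sorted list (deletions counter)
def aScan (g : Int) : List Int → Int → Int
  | [], _ => -1
  | x :: rest, d => if PySem.Int.mod g x = 0 then d else aScan g rest (d + 1)

def count_min_deletions (nums : List Int) (divided_nums : List Int) : Int :=
  aScan (aGcdLoop divided_nums (PySem.List.pyGetD divided_nums 0 0))
    (PySem.List.sorted nums (fun x => x) false) 0

-- ===== PORT B =====
def bGcd (l : List Int) : Int := l.foldl (fun a b => ((Int.gcd a b : Nat) : Int)) 0

def count_min_deletions_alt (nums : List Int) (divided_nums : List Int) : Int :=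
  match PySem.List.min?
      (nums.filter (fun x => x != 0 && (PySem.Int.mod (bGcd divided_nums) x == 0)))
      (fun x => x) with
  | none => -1
  | some m => ((nums.countP (fun x => x < m) : Nat) : Int)

-- ===== PRECONDITION & SPEC =====
-- gcd of the whole list (used only by Pre_; Python's math.gcd is always nonnegative)
def pvGcdListFrom (n : Nat) (l : List Int) : Nat := l.foldl (fun n x => Nat.gcd n x.natAbs) n

-- Pre_ excludes exactly the inputs on which A raises: an empty divided_nums (IndexError on
-- divided_nums[0]), and lists where A's sorted scan hits the element 0 before any divisor of the
-- gcd (ZeroDivisionError on min_gcd % 0), i.e. 0 ∈ nums with no negative divisor of the gcd.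
def Pre_count_min_deletions (nums : List Int) (divided_nums : List Int) : Prop :=
  divided_nums ≠ [] ∧
    (0 ∈ nums → ∃ x ∈ nums, x < 0 ∧ PySem.Int.mod ((pvGcdListFrom 0 divided_nums : Nat) : Int) x = 0)
instance (nums : List Int) (divided_nums : List Int) : Decidable (Pre_count_min_deletions nums divided_nums) := by unfold Pre_count_min_deletions; infer_instance

def pvWitness_count_min_deletions : List Int × List Int := ([2, 4], [8, 12])

def Spec_count_min_deletions (nums : List Int) (divided_nums : List Int) (out : Int) : Prop := out = count_min_deletions_alt nums divided_nums
instance (nums : List Int) (divided_nums : List Int) (out : Int) : Decidable (Spec_count_min_deletions nums divided_nums out) := by unfold Spec_count_min_deletions; infer_instance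

-- ===== CLAIM (what is proved, stated in full; the proofs are below) =====
def Claim_equal_count_min_deletions : Prop := ∀ (nums : List Int) (divided_nums : List Int), Dom_count_min_deletions nums divided_nums → Pre_count_min_deletions nums divided_nums → Spec_count_min_deletions nums divided_nums (count_min_deletions nums divided_nums)

-- ===== LEMMAS AND PROOFS =====

lemma gcdFrom_one (l : List Int) : pvGcdListFrom 1 l = 1 := by
  induction l with
  | nil => rfl
  | cons x t ih => simpa [pvGcdListFrom, Nat.gcd_one_left] using ih

lemma gcd_absorb (a b c : Nat) :
    Nat.gcd (Nat.gcd a (Nat.gcd b c)) c = Nat.gcd (Nat.gcd a b) c := by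
  rw [Nat.gcd_assoc a b c, Nat.gcd_assoc a (Nat.gcd b c) c, Nat.gcd_assoc b c c, Nat.gcd_self]

lemma aGcdLoop_natAbs : ∀ (t : List Int) (x m : Int),
    (aGcdLoop (x :: t) m).natAbs =
      if t = [] then m.natAbs else pvGcdListFrom (Nat.gcd m.natAbs x.natAbs) t := by
  intro t
  induction t with
  | nil => intro x m; simp [aGcdLoop]
  | cons y t' ih =>
    intro x m
    simp only [aGcdLoop, reduceCtorEq, if_false]
    have hm' : ((Int.gcd m ((Int.gcd x y : Nat) : Int) : Nat) : Int).natAbs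
        = Nat.gcd m.natAbs (Nat.gcd x.natAbs y.natAbs) := by
      simp [Int.gcd]
    split_ifs with h1
    · have h0 : Nat.gcd m.natAbs (Nat.gcd x.natAbs y.natAbs) = 1 := by
        rw [← hm', h1]; rfl
      have h2 : Nat.gcd (Nat.gcd m.natAbs x.natAbs) y.natAbs = 1 := by
        rw [Nat.gcd_assoc]; exact h0
      show Int.natAbs 1 = List.foldl (fun n x => Nat.gcd n x.natAbs)
        (Nat.gcd (Nat.gcd m.natAbs x.natAbs) y.natAbs) t'
      rw [h2]
      simpa [pvGcdListFrom] using (gcdFrom_one t').symm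
    · rw [ih y _, hm']
      rcases Decidable.em (t' = []) with h | h
      · subst h
        simp [pvGcdListFrom, Nat.gcd_assoc]
      · simp only [h, if_false]
        have h3 : Nat.gcd (Nat.gcd m.natAbs (Nat.gcd x.natAbs y.natAbs)) y.natAbs
            = Nat.gcd (Nat.gcd m.natAbs x.natAbs) y.natAbs :=
          gcd_absorb m.natAbs x.natAbs y.natAbs
        show List.foldl (fun n x => Nat.gcd n x.natAbs)
            (Nat.gcd (Nat.gcd m.natAbs (Nat.gcd x.natAbs y.natAbs)) y.natAbs) t'
          = pvGcdListFrom (Nat.gcd m.natAbs x.natAbs) (y :: t')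
        rw [h3]
        rfl

lemma bGcd_from (l : List Int) : ∀ (n : Nat),
    l.foldl (fun a b => ((Int.gcd a b : Nat) : Int)) (n : Int) = ((pvGcdListFrom n l : Nat) : Int) := by
  induction l with
  | nil => intro n; rfl
  | cons x t ih =>
    intro n
    have : ((Int.gcd (n : Int) x : Nat) : Int) = ((Nat.gcd n x.natAbs : Nat) : Int) := by
      simp [Int.gcd]
    simp only [List.foldl_cons, pvGcdListFrom, this]
    exact ih (Nat.gcd n x.natAbs)

lemma bGcd_eq (l : List Int) : bGcd l = ((pvGcdListFrom 0 l : Nat) : Int) := by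
  have := bGcd_from l 0
  simpa [bGcd] using this

-- A's gcd loop result has the same absolute value as the gcd of the whole list
lemma aGcd_natAbs_eq (d : Int) (t : List Int) :
    (aGcdLoop (d :: t) d).natAbs = pvGcdListFrom 0 (d :: t) := by
  rw [aGcdLoop_natAbs t d d]
  rcases Decidable.em (t = []) with h | h
  · subst h; simp [pvGcdListFrom]
  · simp only [h, if_false, pvGcdListFrom, List.foldl_cons, Nat.gcd_self, Nat.gcd_zero_left]

lemma foldl_min_eq_self : ∀ (l : List Int) (x : Int), (∀ y ∈ l, x ≤ y) → l.foldl min x = x := by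
  intro l
  induction l with
  | nil => intro x _; rfl
  | cons y t ih =>
    intro x h
    have hxy : x ≤ y := h y (by simp)
    simp only [List.foldl_cons, min_eq_left hxy]
    exact ih x (fun z hz => h z (by simp [hz]))

lemma min?_id_perm (l1 l2 : List Int) (h : l1.Perm l2) :
    PySem.List.min? l1 (fun x => x) = PySem.List.min? l2 (fun x => x) := by
  cases h1 : PySem.List.min? l1 (fun x => x) with
  | none =>
    have e1 : l1 = [] := (PySem.List.min?_eq_none_iff l1 _).1 h1
    subst e1
    have e2 : l2 = [] := h.nil_eq.symm
    subst e2
    exact ((PySem.List.min?_eq_none_iff ([] : List Int) _).2 rfl).symm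
  | some m1 =>
    cases h2 : PySem.List.min? l2 (fun x => x) with
    | none =>
      have e2 : l2 = [] := (PySem.List.min?_eq_none_iff l2 _).1 h2
      subst e2
      have e1 : l1 = [] := h.eq_nil
      subst e1
      rw [(PySem.List.min?_eq_none_iff ([] : List Int) (fun x => x)).2 rfl] at h1
      cases h1
    | some m2 =>
      have hm1 : m1 ∈ l1 := PySem.List.min?_mem h1
      have hm2 : m2 ∈ l2 := PySem.List.min?_mem h2
      have h12 : m1 ≤ m2 := PySem.List.min?_isMin h1 m2 (h.mem_iff.2 hm2)
      have h21 : m2 ≤ m1 := PySem.List.min?_isMin h2 m1 (h.mem_iff.1 hm1)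
      rw [le_antisymm h12 h21]

-- the boolean filter test, unpacked
lemma pb_iff (g x : Int) :
    ((x != 0 && (PySem.Int.mod g x == 0)) = true) ↔ (x ≠ 0 ∧ x ∣ g) := by
  simp [PySem.Int.mod_eq_zero_iff_dvd]

-- main scan lemma: A's counting scan over a sorted list equals B's min-of-divisors count
lemma scan_eq (gA gB : Int) (hdvd : ∀ x : Int, x ∣ gA ↔ x ∣ gB) :
    ∀ (s : List Int) (d : Int),
      s.Pairwise (· ≤ ·) →
      (0 ∈ s → ∃ y ∈ s, y < 0 ∧ y ∣ gB) →
      aScan gA s d =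
        (match PySem.List.min? (s.filter (fun x => x != 0 && (PySem.Int.mod gB x == 0))) (fun x => x) with
          | none => -1
          | some m => d + ((s.countP (fun x => x < m) : Nat) : Int)) := by
  intro s
  induction s with
  | nil => intro d _ _; rfl
  | cons x t ih =>
    intro d hp hz
    have hx_le : ∀ y ∈ t, x ≤ y := (List.pairwise_cons.1 hp).1
    have hpt : t.Pairwise (· ≤ ·) := (List.pairwise_cons.1 hp).2
    by_cases hpb : (x != 0 && (PySem.Int.mod gB x == 0)) = true
    · -- x is a divisor: A returns d, and x is the minimum of the candidate list
      obtain ⟨hx0, hxd⟩ := (pb_iff gB x).1 hpb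
      have hAx : PySem.Int.mod gA x = 0 :=
        (PySem.Int.mod_eq_zero_iff_dvd gA x).2 ((hdvd x).2 hxd)
      have hfilter : (x :: t).filter (fun x => x != 0 && (PySem.Int.mod gB x == 0))
          = x :: t.filter (fun x => x != 0 && (PySem.Int.mod gB x == 0)) := by
        simp [hpb]
      rw [hfilter, PySem.List.min?_id_cons]
      have hmin : (t.filter (fun x => x != 0 && (PySem.Int.mod gB x == 0))).foldl min x = x :=
        foldl_min_eq_self _ x (fun y hy => hx_le y (List.mem_of_mem_filter hy))
      have hcount : (x :: t).countP (fun y => decide (y < x)) = 0 := by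
        rw [List.countP_eq_zero]
        intro y hy
        rcases List.mem_cons.1 hy with rfl | hyt
        · simp
        · simp only [decide_eq_true_eq]; exact not_lt.2 (hx_le y hyt)
      simp [aScan, hAx, hmin, hcount]
    · -- x is no candidate
      by_cases hAx : PySem.Int.mod gA x = 0
      · -- then x must be 0, contradicting the precondition (sorted: 0 is minimal, no negative left)
        exfalso
        have hx0 : x = 0 := by
          by_contra hne
          exact hpb ((pb_iff gB x).2 ⟨hne, (hdvd x).1 ((PySem.Int.mod_eq_zero_iff_dvd gA x).1 hAx)⟩)
        obtain ⟨y, hy, hylt, hyd⟩ := hz (by simp [hx0.symm])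
        rcases List.mem_cons.1 hy with rfl | hyt
        · omega
        · have := hx_le y hyt; omega
      · -- scan moves on
        have hz' : 0 ∈ t → ∃ y ∈ t, y < 0 ∧ y ∣ gB := by
          intro h0
          obtain ⟨y, hy, hylt, hyd⟩ := hz (by simp [h0])
          rcases List.mem_cons.1 hy with rfl | hyt
          · exact absurd ((pb_iff gB y).2 ⟨by omega, hyd⟩) hpb
          · exact ⟨y, hyt, hylt, hyd⟩
        have hfilter : (x :: t).filter (fun x => x != 0 && (PySem.Int.mod gB x == 0))
            = t.filter (fun x => x != 0 && (PySem.Int.mod gB x == 0)) := by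
          simp [hpb]
        have hstep : aScan gA (x :: t) d = aScan gA t (d + 1) := by
          simp [aScan, hAx]
        rw [hstep, ih (d + 1) hpt hz', hfilter]
        cases hmin : PySem.List.min? (t.filter (fun x => x != 0 && (PySem.Int.mod gB x == 0))) (fun x => x) with
        | none => rfl
        | some m =>
          have hmf := List.mem_filter.1 (PySem.List.min?_mem hmin)
          have hmt : m ∈ t := hmf.1
          have hpbm : (m != 0 && (PySem.Int.mod gB m == 0)) = true := hmf.2
          have hxm : x < m := by
            have hle := hx_le m hmt
            rcases lt_or_eq_of_le hle with h | h
            · exact h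
            · exact absurd (h ▸ hpbm) hpb
          have : (x :: t).countP (fun y => decide (y < m)) = t.countP (fun y => decide (y < m)) + 1 := by
            simp [hxm]
          simp only [this]
          push_cast
          ring

-- ===== VERDICT (by name: the statement is the Claim_ definition above) =====
theorem count_min_deletions_spec : Claim_equal_count_min_deletions := by
  intro nums divided_nums _hDom hPre
  obtain ⟨hne, hz⟩ := hPre
  obtain ⟨d, t, rfl⟩ : ∃ d t, divided_nums = d :: t := by
    cases divided_nums with
    | nil => exact absurd rfl hne
    | cons d t => exact ⟨d, t, rfl⟩
  unfold Spec_count_min_deletions count_min_deletions count_min_deletions_alt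
  set gB : Int := bGcd (d :: t) with hgB
  set gA : Int := aGcdLoop (d :: t) (PySem.List.pyGetD (d :: t) 0 0) with hgA
  have hget : PySem.List.pyGetD (d :: t) 0 0 = d := PySem.List.pyGetD_zero_cons d t 0
  have habs : gA.natAbs = pvGcdListFrom 0 (d :: t) := by
    rw [hgA, hget]; exact aGcd_natAbs_eq d t
  have hgBval : gB = ((pvGcdListFrom 0 (d :: t) : Nat) : Int) := bGcd_eq (d :: t)
  have hdvd : ∀ x : Int, x ∣ gA ↔ x ∣ gB := by
    intro x
    rw [hgBval, ← habs]
    exact (Int.dvd_natAbs).symm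
  set s := PySem.List.sorted nums (fun x => x) false with hs
  have hperm : s.Perm nums := PySem.List.sorted_perm nums _ false
  have hzs : 0 ∈ s → ∃ y ∈ s, y < 0 ∧ y ∣ gB := by
    intro h0
    obtain ⟨y, hy, hylt, hyd⟩ := hz (hperm.mem_iff.1 h0)
    refine ⟨y, hperm.mem_iff.2 hy, hylt, ?_⟩
    have := (PySem.Int.mod_eq_zero_iff_dvd _ y).1 hyd
    rwa [← hgBval] at this
  have hpw : s.Pairwise (· ≤ ·) := by
    have := PySem.List.sorted_pairwise (xs := nums) (key := fun x : Int => x)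
    simpa using this
  rw [scan_eq gA gB hdvd s 0 hpw hzs]
  rw [min?_id_perm _ _ (hperm.filter _)]
  cases hmin : PySem.List.min? (nums.filter (fun x => x != 0 && (PySem.Int.mod gB x == 0))) (fun x => x) with
  | none => rfl
  | some m =>
    have : s.countP (fun y => decide (y < m)) = nums.countP (fun y => decide (y < m)) :=
      hperm.countP_eq _
    simp [this]
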